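-- pv_equiv track=rewrite | github.com/qeedquan/challenges | codegolf/carryless-factors.py | clf
-- ===== SOURCE A (Python) =====
-- def clf(n):
--     if n < 1:
--         return []
--
--     r = [n]
--     for k in range(n - 1, -1, -1):
--         m = n
--         for i in range(n - 1, -1, -1):
--             m = min((k << i) ^ m, m)
--         if m < 1:
--             r.append(k)
--
--     return r[::-1]
-- ===== SOURCE B (Python) =====
-- def clf(n):
--     # B: test each candidate k by carryless (GF(2)) long division driven by bit
--     # lengths (xor off the leading term until the remainder is shorter than k),
--     # instead of A's fixed n-step min/xor reduction per candidate.
--     if n < 1: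
--         return []
--
--     def clmod(a, b):
--         lb = b.bit_length()
--         while a.bit_length() >= lb:
--             a ^= b << (a.bit_length() - lb)
--         return a
--
--     return [k for k in range(1, n) if clmod(n, k) == 0] + [n]
-- ===== Notes on version B (the rewrite author's own statement) =====
-- stated objective: faster
-- what changed: Instead of A's fixed n-iteration min/xor scan per candidate, B checks each candidate with a carryless long-division while loop driven by bit lengths (xor off the leading term until the remainder is shorter than the divisor) and builds the ascending result directly.
import Mathlib
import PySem

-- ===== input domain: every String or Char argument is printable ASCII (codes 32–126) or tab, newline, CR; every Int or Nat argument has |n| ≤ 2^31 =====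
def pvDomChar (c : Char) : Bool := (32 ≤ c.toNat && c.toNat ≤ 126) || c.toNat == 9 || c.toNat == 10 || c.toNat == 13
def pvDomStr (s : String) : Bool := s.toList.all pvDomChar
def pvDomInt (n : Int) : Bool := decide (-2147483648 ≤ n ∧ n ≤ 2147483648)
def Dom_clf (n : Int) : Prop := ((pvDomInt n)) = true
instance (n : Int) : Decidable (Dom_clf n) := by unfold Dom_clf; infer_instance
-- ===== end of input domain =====

-- B replaces A's fixed n-iteration min/xor scan per candidate by carryless (GF(2))
-- long division driven by bit lengths, building the ascending result directly (faster).


-- Python's `a << i` for a shift amount that is a Nat (exact per the PySem shifts note)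
def shl (a : Int) (i : Nat) : Int := a <<< i

-- ===== PORT A =====
-- inner loop of A: m = n; for i in range(n-1, -1, -1): m = min((k << i) ^ m, m)
-- (every i produced by this range is ≥ 0, so `i.toNat` is exact for Python's `k << i`)
def clfReduce (n k : Int) : Int :=
  (PySem.List.pyRange (n - 1) (-1) (-1)).foldl
    (fun m i => min (PySem.Int.bxor (shl k i.toNat) m) m) n

def clf (n : Int) : List Int :=
  if n < 1 then []
  else
    let r := (PySem.List.pyRange (n - 1) (-1) (-1)).foldl
      (fun r k => if clfReduce n k < 1 then r ++ [k] else r) [n]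
    r.reverse  -- r[::-1]

-- ===== PORT B =====
-- Lemmas cited by clmod's decreasing_by (a port may keep its termination lemmas above it).

-- disjoint bits: xoring a shifted value onto b < 2^i adds it
lemma nat_shiftLeft_xor_of_lt (a b i : Nat) (h : b < 2 ^ i) :
    (a <<< i) ^^^ b = a <<< i + b := by
  rw [Nat.shiftLeft_add_eq_or_of_lt h]
  apply Nat.eq_of_testBit_eq
  intro j
  rw [Nat.testBit_xor, Nat.testBit_or]
  rcases lt_or_ge j i with hj | hj
  · rw [Nat.testBit_shiftLeft]
    simp [Nat.not_le.mpr hj]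
  · have hb : b.testBit j = false :=
      Nat.testBit_lt_two_pow (lt_of_lt_of_le h (Nat.pow_le_pow_right (by norm_num) hj))
    simp [hb]

-- two numbers with the same top bit: their xor loses that bit
lemma xor_top_lt (x y t : Nat) (hx1 : 2 ^ t ≤ x) (hx2 : x < 2 ^ (t + 1))
    (hy1 : 2 ^ t ≤ y) (hy2 : y < 2 ^ (t + 1)) : x ^^^ y < 2 ^ t := by
  have hx' : x = 2 ^ t ^^^ (x - 2 ^ t) := by
    have := nat_shiftLeft_xor_of_lt 1 (x - 2 ^ t) t (by rw [pow_succ] at hx2; omega)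
    rw [Nat.one_shiftLeft] at this; omega
  have hy' : y = 2 ^ t ^^^ (y - 2 ^ t) := by
    have := nat_shiftLeft_xor_of_lt 1 (y - 2 ^ t) t (by rw [pow_succ] at hy2; omega)
    rw [Nat.one_shiftLeft] at this; omega
  rw [hx', hy']
  have : (2 ^ t ^^^ (x - 2 ^ t)) ^^^ (2 ^ t ^^^ (y - 2 ^ t))
      = (x - 2 ^ t) ^^^ (y - 2 ^ t) := by
    rw [Nat.xor_comm (2 ^ t) (x - 2 ^ t), Nat.xor_assoc, ← Nat.xor_assoc (2 ^ t),
      Nat.xor_self, Nat.zero_xor]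
  rw [this]
  exact Nat.xor_lt_two_pow (by rw [pow_succ] at hx2; omega) (by rw [pow_succ] at hy2; omega)

lemma bitLength_pos (b : Int) (hb : b ≠ 0) : 1 ≤ PySem.Int.bitLength b := by
  by_contra h
  have h5 := PySem.Int.lt_two_pow_bitLength b
  have : PySem.Int.bitLength b = 0 := by omega
  rw [this] at h5
  simp at h5
  omega

lemma bitLength_le_of_lt_two_pow (x : Int) (t : Nat) (h : x.natAbs < 2 ^ t) :
    PySem.Int.bitLength x ≤ t := by
  by_cases hx : x = 0
  · simp [hx]
  · by_contra hc
    have h2 := PySem.Int.two_pow_bitLength_le x hx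
    have : (2 : Nat) ^ t ≤ 2 ^ (PySem.Int.bitLength x - 1) :=
      Nat.pow_le_pow_right (by norm_num) (by omega)
    omega

-- bounds on (k << j) for 1 ≤ k
lemma shl_toNat_bounds (k : Int) (hk : 1 ≤ k) (j : Nat) :
    0 ≤ shl k j ∧ 2 ^ (j + PySem.Int.bitLength k - 1) ≤ (shl k j).toNat ∧
      (shl k j).toNat < 2 ^ (j + PySem.Int.bitLength k) := by
  have hsh : shl k j = k * 2 ^ j := by rw [shl, Int.shiftLeft_eq]
  have hpos : 0 ≤ shl k j := by rw [hsh]; positivity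
  have habs : (shl k j).toNat = k.toNat * 2 ^ j := by
    rw [hsh]
    rcases Int.eq_ofNat_of_zero_le (by omega : (0:Int) ≤ k) with ⟨K, rfl⟩
    rw [show ((K : Int) * 2 ^ j) = ((K * 2 ^ j : Nat) : Int) by push_cast; ring,
      Int.toNat_natCast, Int.toNat_natCast]
  have h1 : 2 ^ (PySem.Int.bitLength k - 1) ≤ k.natAbs :=
    PySem.Int.two_pow_bitLength_le k (by omega)
  have h2 : k.natAbs < 2 ^ PySem.Int.bitLength k := PySem.Int.lt_two_pow_bitLength k
  have hL : 1 ≤ PySem.Int.bitLength k := bitLength_pos k (by omega)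
  have hkn : k.toNat = k.natAbs := by omega
  refine ⟨hpos, ?_, ?_⟩
  · rw [habs, hkn, show j + PySem.Int.bitLength k - 1 = (PySem.Int.bitLength k - 1) + j by omega,
      pow_add]
    exact Nat.mul_le_mul_right _ h1
  · rw [habs, hkn, show j + PySem.Int.bitLength k = PySem.Int.bitLength k + j by omega, pow_add]
    exact Nat.mul_lt_mul_of_pos_right h2 (Nat.two_pow_pos j)

-- one division step: the xor is nonnegative and strictly shorter
lemma step_decrease (a b : Int) (ha : 0 ≤ a) (hb : 1 ≤ b)
    (hab : PySem.Int.bitLength b ≤ PySem.Int.bitLength a) :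
    0 ≤ PySem.Int.bxor a (b <<< (PySem.Int.bitLength a - PySem.Int.bitLength b)) ∧
    PySem.Int.bitLength
        (PySem.Int.bxor a (b <<< (PySem.Int.bitLength a - PySem.Int.bitLength b)))
      < PySem.Int.bitLength a := by
  have hLb : 1 ≤ PySem.Int.bitLength b := bitLength_pos b (by omega)
  have hLa : 1 ≤ PySem.Int.bitLength a := le_trans hLb hab
  have ha0 : a ≠ 0 := by
    intro h; rw [h] at hLa; simp [PySem.Int.bitLength_zero] at hLa
  obtain ⟨hc0, hc1, hc2⟩ := shl_toNat_bounds b hb (PySem.Int.bitLength a - PySem.Int.bitLength b)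
  have hceq : (PySem.Int.bitLength a - PySem.Int.bitLength b) + PySem.Int.bitLength b
      = PySem.Int.bitLength a := by omega
  rw [hceq] at hc1 hc2
  have ha1 : 2 ^ (PySem.Int.bitLength a - 1) ≤ a.natAbs := PySem.Int.two_pow_bitLength_le a ha0
  have ha2 : a.natAbs < 2 ^ PySem.Int.bitLength a := PySem.Int.lt_two_pow_bitLength a
  have han : a.toNat = a.natAbs := by omega
  have hx : PySem.Int.bxor a (b <<< (PySem.Int.bitLength a - PySem.Int.bitLength b))
      = ((a.toNat ^^^ (shl b (PySem.Int.bitLength a - PySem.Int.bitLength b)).toNat : Nat) : Int) :=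
    PySem.Int.bxor_of_nonneg ha hc0
  have hpow : PySem.Int.bitLength a = (PySem.Int.bitLength a - 1) + 1 := by omega
  have hlt : a.toNat ^^^ (shl b (PySem.Int.bitLength a - PySem.Int.bitLength b)).toNat
      < 2 ^ (PySem.Int.bitLength a - 1) := by
    apply xor_top_lt _ _ _ (by omega) (by rw [← hpow]; omega) (by omega) (by rw [← hpow]; omega)
  constructor
  · rw [hx]; exact Int.natCast_nonneg _
  · rw [hx]
    have := bitLength_le_of_lt_two_pow
      ((a.toNat ^^^ (shl b (PySem.Int.bitLength a - PySem.Int.bitLength b)).toNat : Nat) : Int)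
      (PySem.Int.bitLength a - 1) (by simpa using hlt)
    omega

-- carryless remainder: `while a.bit_length() >= lb: a ^= b << (a.bit_length() - lb)`
-- (the guard's `1 ≤ b ∧ 0 ≤ a` only makes the recursion total; B calls it with 1 ≤ k, 0 ≤ n)
def clmod (a b : Int) : Int :=
  if h : 1 ≤ b ∧ 0 ≤ a ∧ PySem.Int.bitLength b ≤ PySem.Int.bitLength a then
    clmod (PySem.Int.bxor a (b <<< (PySem.Int.bitLength a - PySem.Int.bitLength b))) b
  else a
termination_by PySem.Int.bitLength a
decreasing_by exact (step_decrease a b h.2.1 h.1 h.2.2).2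

def clf_alt (n : Int) : List Int :=
  if n < 1 then []
  else ((PySem.List.pyRange 1 n 1).filter (fun k => clmod n k == 0)) ++ [n]

-- ===== PRECONDITION & SPEC =====
def Spec_clf (n : Int) (out : List Int) : Prop := out = clf_alt n
instance (n : Int) (out : List Int) : Decidable (Spec_clf n out) := by unfold Spec_clf; infer_instance

-- ===== CLAIM (what is proved, stated in full; the proofs are below) =====
def Claim_equal_clf : Prop := ∀ (n : Int), Dom_clf n → Spec_clf n (clf n)

-- ===== LEMMAS AND PROOFS =====

-- xor with a number whose top bit is above x keeps that bit
lemma xor_top_ge (x y t : Nat) (hx : x < 2 ^ t) (hy1 : 2 ^ t ≤ y) (hy2 : y < 2 ^ (t + 1)) :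
    2 ^ t ≤ x ^^^ y := by
  have hy' : y = 2 ^ t ^^^ (y - 2 ^ t) := by
    have := nat_shiftLeft_xor_of_lt 1 (y - 2 ^ t) t (by rw [pow_succ] at hy2; omega)
    rw [Nat.one_shiftLeft] at this; omega
  have hxy : x ^^^ y = 2 ^ t ^^^ (x ^^^ (y - 2 ^ t)) := by
    conv_lhs => rw [hy']
    rw [← Nat.xor_assoc, Nat.xor_comm x (2 ^ t), Nat.xor_assoc]
  have hlt : x ^^^ (y - 2 ^ t) < 2 ^ t :=
    Nat.xor_lt_two_pow hx (by rw [pow_succ] at hy2; omega)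
  have := nat_shiftLeft_xor_of_lt 1 (x ^^^ (y - 2 ^ t)) t hlt
  rw [Nat.one_shiftLeft] at this
  omega

lemma clmod_eq_self (a b : Int)
    (h : ¬(1 ≤ b ∧ 0 ≤ a ∧ PySem.Int.bitLength b ≤ PySem.Int.bitLength a)) :
    clmod a b = a := by
  rw [clmod, dif_neg h]

lemma clmod_step (a b : Int)
    (h : 1 ≤ b ∧ 0 ≤ a ∧ PySem.Int.bitLength b ≤ PySem.Int.bitLength a) :
    clmod a b
      = clmod (PySem.Int.bxor a (b <<< (PySem.Int.bitLength a - PySem.Int.bitLength b))) b := by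
  conv_lhs => rw [clmod]
  rw [dif_pos h]

lemma shl_nonneg (k : Int) (i : Nat) (hk : 0 ≤ k) : 0 ≤ shl k i := by
  rw [shl, Int.shiftLeft_eq]; positivity

-- the fold state of A's inner loop stays within [0, n]
lemma reduce_bounds (n k : Int) (hk : 0 ≤ k) (l : List Int) (m : Int) (h0 : 0 ≤ m) (h1 : m ≤ n) :
    0 ≤ l.foldl (fun m i => min (PySem.Int.bxor (shl k i.toNat) m) m) m ∧
    l.foldl (fun m i => min (PySem.Int.bxor (shl k i.toNat) m) m) m ≤ n := by
  induction l generalizing m with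
  | nil => exact ⟨h0, h1⟩
  | cons i l ih =>
    rw [List.foldl_cons]
    apply ih
    · apply le_min _ h0
      rw [PySem.Int.bxor_of_nonneg (shl_nonneg k i.toNat hk) h0]
      exact Int.natCast_nonneg _
    · exact le_trans (min_le_right _ _) h1

-- bit_length n fits under n itself (n ≥ 1)
lemma bitLength_le (n : Int) (hn : 1 ≤ n) : (PySem.Int.bitLength n : Int) ≤ n := by
  set L := PySem.Int.bitLength n with hL
  have h2 : 2 ^ (L - 1) ≤ n.natAbs := PySem.Int.two_pow_bitLength_le n (by omega)
  have h3 : L - 1 < 2 ^ (L - 1) := Nat.lt_two_pow_self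
  have h5 : n.natAbs < 2 ^ L := PySem.Int.lt_two_pow_bitLength n
  have h4 : 1 ≤ L := by
    by_contra hc
    have hL0 : L = 0 := by omega
    rw [hL0] at h5
    simp at h5
    omega
  have : L ≤ n.natAbs := by omega
  omega

-- the countdown ranges are reversed ascending ranges
lemma range_rev (a : Int) :
    PySem.List.pyRange (a - 1) (-1) (-1) = (PySem.List.pyRange 0 a 1).reverse := by
  rw [PySem.List.pyRange_neg_one_eq_reverse]
  norm_num

-- A's descending min/xor fold over j, j-1, …, 0 computes the carryless remainder:
-- each xor A accepts happens exactly at shift bitLength m - bitLength k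
lemma foldA_eq_clmod (k : Int) (hk : 1 ≤ k) :
    ∀ (j : Nat) (m : Int), 0 ≤ m → PySem.Int.bitLength m < j + PySem.Int.bitLength k →
    (PySem.List.pyRange ((j : Int) - 1) (-1) (-1)).foldl
        (fun m i => min (PySem.Int.bxor (shl k i.toNat) m) m) m = clmod m k := by
  intro j
  induction j with
  | zero =>
    intro m hm hinv
    rw [show ((0 : Nat) : Int) - 1 = -1 by norm_num,
      PySem.List.pyRange_neg_one_eq_nil le_rfl, List.foldl_nil,
      clmod_eq_self m k (by omega)]
  | succ j ih =>
    intro m hm hinv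
    rw [show ((j + 1 : Nat) : Int) - 1 = (j : Int) by push_cast; ring,
      PySem.List.pyRange_neg_one_cons (by omega : (-1 : Int) < (j : Int)), List.foldl_cons]
    have hjt : ((j : Int)).toNat = j := by omega
    rw [hjt]
    have hLk : 1 ≤ PySem.Int.bitLength k := bitLength_pos k (by omega)
    obtain ⟨hc0, hc1, hc2⟩ := shl_toNat_bounds k hk j
    have hmn : m.toNat = m.natAbs := by omega
    have hm2 : m.natAbs < 2 ^ PySem.Int.bitLength m := PySem.Int.lt_two_pow_bitLength m
    by_cases hcase : PySem.Int.bitLength m = j + PySem.Int.bitLength k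
    · -- the leading terms align: A xors, and so does clmod (with shift j)
      have hm0 : m ≠ 0 := by
        intro h; rw [h] at hcase; simp [PySem.Int.bitLength_zero] at hcase; omega
      have hm1 : 2 ^ (PySem.Int.bitLength m - 1) ≤ m.natAbs :=
        PySem.Int.two_pow_bitLength_le m hm0
      have ht1 : j + PySem.Int.bitLength k - 1 + 1 = j + PySem.Int.bitLength k := by omega
      have hm1' : 2 ^ (j + PySem.Int.bitLength k - 1) ≤ m.toNat := by
        rw [show j + PySem.Int.bitLength k - 1 = PySem.Int.bitLength m - 1 by omega]
        omega
      have hm2' : m.toNat < 2 ^ (j + PySem.Int.bitLength k - 1 + 1) := by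
        rw [ht1, ← hcase]
        omega
      have hxlt : (shl k j).toNat ^^^ m.toNat < 2 ^ (j + PySem.Int.bitLength k - 1) :=
        xor_top_lt _ _ _ hc1 (ht1 ▸ hc2) hm1' hm2'
      have hxeq : PySem.Int.bxor (shl k j) m = (((shl k j).toNat ^^^ m.toNat : Nat) : Int) :=
        PySem.Int.bxor_of_nonneg hc0 hm
      have hxm : PySem.Int.bxor (shl k j) m < m := by
        rw [hxeq]
        omega
      rw [min_eq_left hxm.le]
      have hnn : 0 ≤ PySem.Int.bxor (shl k j) m := by
        rw [hxeq]; exact Int.natCast_nonneg _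
      have hbl : PySem.Int.bitLength (PySem.Int.bxor (shl k j) m)
          < j + PySem.Int.bitLength k := by
        rw [hxeq]
        have := bitLength_le_of_lt_two_pow (((shl k j).toNat ^^^ m.toNat : Nat) : Int)
          (j + PySem.Int.bitLength k - 1) (by simpa using hxlt)
        omega
      rw [ih _ hnn hbl]
      rw [clmod_step m k ⟨hk, hm, by omega⟩]
      have hsh : PySem.Int.bitLength m - PySem.Int.bitLength k = j := by omega
      rw [hsh, PySem.Int.bxor_comm]
      rfl
    · -- k's leading term is above m: A's min keeps m, and this i does nothing
      have hmlt : m.toNat < 2 ^ (j + PySem.Int.bitLength k - 1) := by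
        have : PySem.Int.bitLength m ≤ j + PySem.Int.bitLength k - 1 := by omega
        have h2 : (2 : Nat) ^ PySem.Int.bitLength m ≤ 2 ^ (j + PySem.Int.bitLength k - 1) :=
          Nat.pow_le_pow_right (by norm_num) this
        omega
      have hge : 2 ^ (j + PySem.Int.bitLength k - 1) ≤ m.toNat ^^^ (shl k j).toNat := by
        apply xor_top_ge _ _ _ hmlt hc1
        rw [show (j + PySem.Int.bitLength k - 1) + 1 = j + PySem.Int.bitLength k by omega]
        exact hc2
      have hxeq : PySem.Int.bxor (shl k j) m = (((shl k j).toNat ^^^ m.toNat : Nat) : Int) :=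
        PySem.Int.bxor_of_nonneg hc0 hm
      have hmin : min (PySem.Int.bxor (shl k j) m) m = m := by
        apply min_eq_right
        rw [hxeq, Nat.xor_comm ((shl k j).toNat) m.toNat]
        omega
      rw [hmin]
      exact ih m hm (by omega)

-- k = 0 never reduces n
lemma reduce_zero (n : Int) (_hn : 1 ≤ n) : clfReduce n 0 = n := by
  unfold clfReduce
  have : ∀ l : List Int, l.foldl (fun m i => min (PySem.Int.bxor (shl 0 i.toNat) m) m) n = n := by
    intro l
    induction l with
    | nil => rfl
    | cons i l ih =>
      rw [List.foldl_cons]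
      have : shl 0 i.toNat = 0 := by rw [shl, Int.shiftLeft_eq]; ring
      rw [this, PySem.Int.bxor_comm, PySem.Int.bxor_zero, min_self]
      exact ih
  exact this _

-- A's inner loop equals the carryless remainder (n ≥ 1, k ≥ 1)
lemma clfReduce_eq_clmod (n k : Int) (hn : 1 ≤ n) (hk : 1 ≤ k) :
    clfReduce n k = clmod n k := by
  unfold clfReduce
  have h1 : n - 1 = ((n.toNat : Int)) - 1 := by omega
  have hLn : (PySem.Int.bitLength n : Int) ≤ n := bitLength_le n hn
  have hLk : 1 ≤ PySem.Int.bitLength k := bitLength_pos k (by omega)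
  rw [h1]
  exact foldA_eq_clmod k hk n.toNat n (by omega) (by omega)

-- ===== VERDICT (by name: the statement is the Claim_ definition above) =====
theorem clf_spec : Claim_equal_clf := by
  unfold Claim_equal_clf Spec_clf
  intro n _
  unfold clf clf_alt
  by_cases hn : n < 1
  · simp [hn]
  · simp only [if_neg hn]
    replace hn : 1 ≤ n := by omega
    rw [PySem.List.foldl_append_ite_eq_filter]
    rw [range_rev n, List.filter_reverse]
    simp only [List.reverse_append, List.reverse_reverse, List.reverse_cons, List.reverse_nil,
      List.nil_append]
    rw [PySem.List.pyRange_one_cons (by omega : (0:Int) < n)]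
    rw [List.filter_cons]
    have h0 : ¬ (clfReduce n 0 < 1) := by rw [reduce_zero n hn]; omega
    simp only [h0, decide_false]
    congr 1
    apply List.filter_congr
    intro k hk
    rw [PySem.List.mem_pyRange_one] at hk
    have he := clfReduce_eq_clmod n k hn (by omega)
    have hb := (reduce_bounds n k (by omega) (PySem.List.pyRange (n - 1) (-1) (-1)) n
      (by omega) le_rfl).1
    rw [show (PySem.List.pyRange (n - 1) (-1) (-1)).foldl
        (fun m i => min (PySem.Int.bxor (shl k i.toNat) m) m) n = clfReduce n k from rfl] at hb
    rw [he] at hb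
    have : (clmod n k == 0) = decide (clmod n k = 0) := by
      cases h : clmod n k == 0 <;> simp_all
    rw [this, decide_eq_decide, ← he]
    rw [he] at *
    omega
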